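-- pv_equiv track=rewrite | github.com/tjmurchie/TackleBox | FlyForge/FlyForge.py | self_repeat_softmask
-- ===== SOURCE A (Python) =====
-- from collections import Counter, defaultdict
-- from typing import List, Dict, Tuple, Set, Optional
--
-- def self_repeat_softmask(seqs: Dict[str, str], k: int = 15, threshold: int = 3) -> Dict[str, str]:
--     """
--     Simple self-repeat masker:
--     - Count k-mers across all sequences.
--     - Any k-mer occurring >= threshold times is considered repetitive.
--     - All positions covered by such k-mers are converted to lowercase.
--     """
--     kmer_counts = Counter()
--     for sid, seq in seqs.items():
--         s = seq.upper()
--         for i in range(0, len(s) - k + 1):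
--             kmer = s[i:i+k]
--             if "N" in kmer:
--                 continue
--             kmer_counts[kmer] += 1
--
--     repeat_kmers = {km for km, c in kmer_counts.items() if c >= threshold}
--
--     masked: Dict[str, str] = {}
--     for sid, seq in seqs.items():
--         s = list(seq.upper())
--         mask = [False] * len(s)
--         for i in range(0, len(s) - k + 1):
--             kmer = "".join(s[i:i+k])
--             if kmer in repeat_kmers:
--                 for j in range(i, i + k):
--                     mask[j] = True
--         for i, m in enumerate(mask):
--             if m:
--                 s[i] = s[i].lower()
--         masked[sid] = "".join(s)
--     return masked
-- ===== SOURCE B (Python) =====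
-- from collections import Counter
--
-- def self_repeat_softmask(seqs, k=15, threshold=3):
--     # Stage 1: count k-mers by flattening every sequence's N-free windows into
--     # one stream and handing it to Counter (no per-kmer increment loop).
--     counts = Counter(km
--                      for _, seq in seqs.items()
--                      for km in _kmers(seq.upper(), k)
--                      if "N" not in km)
--     repeats = {km for km, c in counts.items() if c >= threshold}
--
--     # Stage 2: mask via a difference array + one running-sum coverage sweep
--     # instead of writing True into k mask positions per repetitive window.
--     masked = {}
--     for sid, seq in seqs.items():
--         s = seq.upper()
--         n = len(s)
--         diff = [0] * (n + 1)
--         for i in range(n - k + 1):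
--             if s[i:i+k] in repeats:
--                 diff[i] += 1
--                 diff[i + k] -= 1
--         out = []
--         cov = 0
--         for pos, ch in enumerate(s):
--             cov += diff[pos]
--             out.append(ch.lower() if cov > 0 else ch)
--         masked[sid] = "".join(out)
--     return masked
--
-- def _kmers(s, k):
--     return (s[i:i+k] for i in range(len(s) - k + 1))
-- ===== Notes on version B (the rewrite author's own statement) =====
-- stated objective: alternative
-- what changed: Counting now flattens all N-free windows of all sequences into a single stream handed to Counter (no nested per-kmer increment loop), and masking replaces the per-window inner loop that writes True into k mask positions with a difference array (diff[i]+=1, diff[i+k]-=1 per repetitive window) followed by a single running-sum coverage sweep that lowercases positions with positive coverage.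
-- outside the precondition, e.g. on self_repeat_softmask({'ID': 'ABCD'}, -1, 1): A returns {'ID': 'ABCD'}, B raises IndexError
import Mathlib
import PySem

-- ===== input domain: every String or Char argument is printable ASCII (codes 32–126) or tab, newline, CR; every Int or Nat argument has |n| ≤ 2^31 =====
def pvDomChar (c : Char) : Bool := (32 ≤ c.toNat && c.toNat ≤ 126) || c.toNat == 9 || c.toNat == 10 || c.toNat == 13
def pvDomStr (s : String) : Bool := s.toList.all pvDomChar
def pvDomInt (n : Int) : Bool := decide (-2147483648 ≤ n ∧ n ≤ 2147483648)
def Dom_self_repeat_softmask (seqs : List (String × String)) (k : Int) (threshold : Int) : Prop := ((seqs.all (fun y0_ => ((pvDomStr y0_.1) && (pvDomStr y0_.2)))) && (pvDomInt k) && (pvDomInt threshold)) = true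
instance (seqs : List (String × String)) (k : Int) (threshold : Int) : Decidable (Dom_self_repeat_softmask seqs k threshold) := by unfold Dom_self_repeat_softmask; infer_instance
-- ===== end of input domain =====

-- B counts k-mers by flattening all N-free windows into one stream fed to a Counter, and
-- masks via a difference array plus one running-sum coverage sweep (objective: alternative).

-- ===== PORT A =====
-- per-sequence masking stage of A: mark mask[j] = True for every window in the repeat set,
-- then lowercase the marked positions in place.
def pvMaskSeqA (R : PySem.Set (List Char)) (k : Int) (seq : String) : String :=
  let s := PySem.Chars.upper seq.toList          -- s = list(seq.upper())
  let mask := (PySem.List.pyRange 0 ((s.length : Int) - k + 1) 1).foldl (fun m i =>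
      -- kmer = "".join(s[i:i+k]) : on a list of chars the join of the slice is the slice
      if PySem.Set.contains R (PySem.List.slice s (some i) (some (i + k))) then
        (PySem.List.pyRange i (i + k) 1).foldl (fun m2 j => m2.set j.toNat true) m
      else m) (List.replicate s.length false)
  let s2 := (PySem.List.enumerate mask 0).foldl (fun t pm =>
      if pm.2 then t.set pm.1.toNat (PySem.Chars.lowerChar (PySem.List.pyGetD t pm.1 ' ')) else t) s
  String.ofList s2

-- kmer_counts: nested loop over sequences and window starts, skipping k-mers containing 'N'
def pvCountsA (seqs : List (String × String)) (k : Int) : PySem.Dict (List Char) Int :=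
  seqs.foldl (fun d pr =>
      let s := PySem.Chars.upper pr.2.toList
      (PySem.List.pyRange 0 ((s.length : Int) - k + 1) 1).foldl (fun d2 i =>
        let kmer := PySem.List.slice s (some i) (some (i + k))
        if PySem.Chars.isIn ['N'] kmer then d2 else d2.modify kmer 0 (· + 1)) d) PySem.Dict.empty

def pvRepeatsA (counts : PySem.Dict (List Char) Int) (threshold : Int) : PySem.Set (List Char) :=
  PySem.Set.ofList ((counts.items.filter (fun p => decide (threshold ≤ p.2))).map (·.1))

def self_repeat_softmask (seqs : List (String × String)) (k : Int) (threshold : Int) : List (String × String) :=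
  (seqs.foldl (fun md pr => md.insert pr.1 (pvMaskSeqA (pvRepeatsA (pvCountsA seqs k) threshold) k pr.2))
      (PySem.Dict.empty : PySem.Dict String String)).items

-- ===== PORT B =====
-- _kmers(s, k): the list of all k-windows of s
def pvKmersB (k : Int) (s : List Char) : List (List Char) :=
  (PySem.List.pyRange 0 ((s.length : Int) - k + 1) 1).map
    (fun i => PySem.List.slice s (some i) (some (i + k)))

-- the flattened stream of N-free k-mers over all sequences (the generator fed to Counter)
def pvStreamB (seqs : List (String × String)) (k : Int) : List (List Char) :=
  seqs.flatMap (fun pr =>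
    (pvKmersB k (PySem.Chars.upper pr.2.toList)).filter
      (fun km => !PySem.Chars.isIn ['N'] km))

def pvRepeatsB (seqs : List (String × String)) (k : Int) (threshold : Int) : PySem.Set (List Char) :=
  PySem.Set.ofList ((((PySem.Dict.counter (pvStreamB seqs k)).items.filter
      (fun p => decide (threshold ≤ p.2))).map (·.1)))

-- per-sequence masking stage of B: diff[i] += 1, diff[i+k] -= 1 per repetitive window,
-- then one sweep lowercasing positions whose running coverage is positive.
def pvMaskSeqB (R : PySem.Set (List Char)) (k : Int) (seq : String) : String :=
  let s := PySem.Chars.upper seq.toList          -- s = seq.upper()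
  let diff := (PySem.List.pyRange 0 ((s.length : Int) - k + 1) 1).foldl (fun d i =>
      if PySem.Set.contains R (PySem.List.slice s (some i) (some (i + k))) then
        let d1 := d.set i.toNat (d.getD i.toNat 0 + 1)        -- diff[i] += 1
        d1.set (i + k).toNat (d1.getD (i + k).toNat 0 - 1)    -- diff[i+k] -= 1
      else d) (List.replicate (s.length + 1) (0 : Int))
  let s2 := ((PySem.List.enumerate s 0).foldl (fun st pc =>
      let cov := st.1 + PySem.List.pyGetD diff pc.1 0
      (cov, st.2 ++ [if 0 < cov then PySem.Chars.lowerChar pc.2 else pc.2]))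
      ((0 : Int), ([] : List Char))).2
  String.ofList s2

def self_repeat_softmask_alt (seqs : List (String × String)) (k : Int) (threshold : Int) : List (String × String) :=
  let R := pvRepeatsB seqs k threshold
  (seqs.foldl (fun md pr => md.insert pr.1 (pvMaskSeqB R k pr.2))
      (PySem.Dict.empty : PySem.Dict String String)).items

-- ===== PRECONDITION & SPEC =====
-- Pre_ excludes negative window sizes k < 0: there A returns the input upper-cased unchanged
-- (empty k-mers, no positions marked), while Python B's diff-array write diff[i+k] indexes out of
-- range and raises IndexError whenever the empty k-mer reaches the threshold.
def Pre_self_repeat_softmask (seqs : List (String × String)) (k : Int) (threshold : Int) : Prop :=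
  0 ≤ k
instance (seqs : List (String × String)) (k : Int) (threshold : Int) : Decidable (Pre_self_repeat_softmask seqs k threshold) := by unfold Pre_self_repeat_softmask; infer_instance
def pvWitness_self_repeat_softmask : (List (String × String)) × Int × Int := ([("s1", "ABABA")], 2, 2)

def Spec_self_repeat_softmask (seqs : List (String × String)) (k : Int) (threshold : Int) (out : List (String × String)) : Prop := out = self_repeat_softmask_alt seqs k threshold
instance (seqs : List (String × String)) (k : Int) (threshold : Int) (out : List (String × String)) : Decidable (Spec_self_repeat_softmask seqs k threshold out) := by unfold Spec_self_repeat_softmask; infer_instance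

-- ===== CLAIM (what is proved, stated in full; the proofs are below) =====
def Claim_equal_self_repeat_softmask : Prop := ∀ (seqs : List (String × String)) (k : Int) (threshold : Int), Dom_self_repeat_softmask seqs k threshold → Pre_self_repeat_softmask seqs k threshold → Spec_self_repeat_softmask seqs k threshold (self_repeat_softmask seqs k threshold)

-- ===== LEMMAS AND PROOFS =====

-- A's nested counting loop builds exactly Counter of B's flattened k-mer stream.
lemma pvFoldl_flatMap {α β γ : Type} (l : List α) (g : α → List β) (f : γ → β → γ) (init : γ) :
    (l.flatMap g).foldl f init = l.foldl (fun acc x => (g x).foldl f acc) init := by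
  induction l generalizing init with
  | nil => rfl
  | cons a l ih => simp [List.flatMap_cons, List.foldl_append, ih]

lemma pvCountsSeq_eq (k : Int) (s : List Char) (d : PySem.Dict (List Char) Int) :
    (PySem.List.pyRange 0 ((s.length : Int) - k + 1) 1).foldl (fun d2 i =>
        let kmer := PySem.List.slice s (some i) (some (i + k))
        if PySem.Chars.isIn ['N'] kmer then d2 else d2.modify kmer 0 (· + 1)) d
      = ((pvKmersB k s).filter (fun km => !PySem.Chars.isIn ['N'] km)).foldl
          (fun d km => d.modify km 0 (· + 1)) d := by
  rw [pvKmersB, List.filter_map, List.foldl_map, ← PySem.List.foldl_if_eq_foldl_filter]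
  congr 1
  funext d2 i
  by_cases h : PySem.Chars.isIn ['N'] (PySem.List.slice s (some i) (some (i + k))) <;>
    simp [h, Function.comp]

lemma pvCounts_eq (seqs : List (String × String)) (k : Int) :
    pvCountsA seqs k = PySem.Dict.counter (pvStreamB seqs k) := by
  rw [PySem.Dict.counter_eq_foldl, pvStreamB, pvFoldl_flatMap]
  unfold pvCountsA
  congr 1
  funext d pr
  exact pvCountsSeq_eq k (PySem.Chars.upper pr.2.toList) d

-- the window starts whose k-mer is in the repeat set
def pvHits (R : PySem.Set (List Char)) (k : Int) (s : List Char) : List Int :=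
  (PySem.List.pyRange 0 ((s.length : Int) - k + 1) 1).filter
    (fun i => PySem.Set.contains R (PySem.List.slice s (some i) (some (i + k))))

def pvCover (hits : List Int) (k : Int) (p : Nat) : Bool :=
  hits.any (fun i => decide (i ≤ (p : Int) ∧ (p : Int) < i + k))

-- running coverage before position p
def pvCovN (hits : List Int) (k : Int) (p : Nat) : Int :=
  (hits.countP (fun i => decide (i < (p : Int))) : Int)
    - (hits.countP (fun i => decide (i + k < (p : Int))) : Int)

-- B's sweep output, specified positionally
def pvOut (hits : List Int) (k : Int) : List Char → Nat → List Char
  | [], _ => []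
  | c :: t, p => (if 0 < pvCovN hits k (p + 1) then PySem.Chars.lowerChar c else c) :: pvOut hits k t (p + 1)

lemma pvFoldlLen {α β : Type} (f : List α → β → List α) (l : List β) (init : List α)
    (h : ∀ acc x, (f acc x).length = acc.length) : (l.foldl f init).length = init.length := by
  induction l generalizing init with
  | nil => rfl
  | cons a l ih => simp [List.foldl_cons, ih, h]

lemma pvSetGetD {α : Type} (d : List α) (m : Nat) (v dflt : α) (hm : m < d.length) (q : Nat) :
    (d.set m v).getD q dflt = if q = m then v else d.getD q dflt := by
  simp only [List.getD_eq_getElem?_getD, List.getElem?_set]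
  by_cases h : m = q
  · subst h; simp [hm]
  · simp [h, Ne.symm h]

lemma pvMark_getD (k : Int) (p : Nat) : ∀ (n : Nat) (m : List Bool) (i b : Int),
    (b - i).toNat = n → 0 ≤ i → b ≤ (m.length : Int) →
    ((PySem.List.pyRange i b 1).foldl (fun m2 j => m2.set j.toNat true) m).getD p false
      = (m.getD p false || decide (i ≤ (p : Int) ∧ (p : Int) < b)) := by
  intro n
  induction n with
  | zero =>
    intro m i b hn h0 hb
    rw [PySem.List.pyRange_one_eq_nil (by omega)]
    have hnot : ¬(i ≤ (p : Int) ∧ (p : Int) < b) := by omega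
    simp [hnot]
  | succ n ih =>
    intro m i b hn h0 hb
    have hib : i < b := by omega
    rw [PySem.List.pyRange_one_cons hib]
    simp only [List.foldl_cons]
    rw [ih (m.set i.toNat true) (i + 1) b (by omega) (by omega) (by simpa using hb)]
    rw [pvSetGetD _ _ _ _ (by omega)]
    by_cases hpi : p = i.toNat
    · simp [hpi]
      exact Or.inr ⟨hib, by omega⟩
    · have h3 : (decide (i < (p : Int))) = (decide (i ≤ (p : Int))) := decide_eq_decide.mpr (by omega)
      simp [hpi, h3]

lemma pvMark_len (m : List Bool) (i b : Int) :
    ((PySem.List.pyRange i b 1).foldl (fun m2 j => m2.set j.toNat true) m).length = m.length := by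
  exact pvFoldlLen _ _ _ (fun acc x => by simp)

lemma pvMaskA_getD (k : Int) (p : Nat) : ∀ (hits : List Int) (m : List Bool),
    (∀ i ∈ hits, 0 ≤ i ∧ i + k ≤ (m.length : Int)) →
    (hits.foldl (fun m i => (PySem.List.pyRange i (i + k) 1).foldl (fun m2 j => m2.set j.toNat true) m) m).getD p false
      = (m.getD p false || pvCover hits k p) := by
  intro hits
  induction hits with
  | nil => intro m _; simp [pvCover]
  | cons i hits ih =>
    intro m hb
    have hbi := hb i List.mem_cons_self
    simp only [List.foldl_cons]
    rw [ih _ (fun j hj => by simpa [pvMark_len] using hb j (List.mem_cons_of_mem _ hj))]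
    rw [pvMark_getD k p ((i + k) - i).toNat m i (i + k) rfl hbi.1 hbi.2]
    simp [pvCover, Bool.or_assoc]

lemma pvLowerFold : ∀ (mask : List Bool) (pre t : List Char), t.length = mask.length →
    (PySem.List.enumerate mask (pre.length : Int)).foldl
      (fun t' pm => if pm.2 then t'.set pm.1.toNat (PySem.Chars.lowerChar (PySem.List.pyGetD t' pm.1 ' ')) else t') (pre ++ t)
    = pre ++ List.zipWith (fun c mm => if mm then PySem.Chars.lowerChar c else c) t mask := by
  intro mask
  induction mask with
  | nil =>
    intro pre t h
    rw [List.length_eq_zero_iff.mp h]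
    simp [PySem.List.enumerate]
  | cons mm mask ih =>
    intro pre t h
    cases t with
    | nil => simp at h
    | cons c t' =>
      rw [PySem.List.enumerate_cons]
      simp only [List.foldl_cons]
      have hget : PySem.List.pyGetD (pre ++ c :: t') ((pre.length : Nat) : Int) ' ' = c := by
        rw [PySem.List.pyGetD_natCast]
        simp [List.getD_eq_getElem?_getD, List.getElem?_append_right (Nat.le_refl pre.length)]
      have hset : ∀ v : Char, (pre ++ c :: t').set (((pre.length : Nat) : Int)).toNat v = (pre ++ [v]) ++ t' := by
        intro v
        rw [Int.toNat_natCast, List.set_append]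
        simp
      have hlen : ((pre.length : Int) + 1) = (((pre ++ [PySem.Chars.lowerChar c]).length : Nat) : Int) := by
        simp
      have hlen2 : ((pre.length : Int) + 1) = (((pre ++ [c]).length : Nat) : Int) := by
        simp
      cases mm with
      | false =>
        rw [if_neg (by simp)]
        have hre : (pre ++ c :: t') = (pre ++ [c]) ++ t' := by simp
        rw [hre, hlen2, ih (pre ++ [c]) t' (by simpa using h)]
        simp
      | true =>
        rw [if_pos (by simp), hget, hset, hlen, ih (pre ++ [PySem.Chars.lowerChar c]) t' (by simpa using h)]
        simp

lemma pvCountP_lt_succ (l : List Int) (f : Int → Int) (x : Int) :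
    l.countP (fun i => decide (f i < x + 1))
      = l.countP (fun i => decide (f i < x)) + l.countP (fun i => decide (x = f i)) := by
  induction l with
  | nil => rfl
  | cons a l ih =>
    simp only [List.countP_cons, ih]
    by_cases h1 : f a < x + 1 <;> by_cases h2 : f a < x <;> by_cases h3 : x = f a <;>
      simp [h1, h2, h3] <;> omega

lemma pvCountP_sub (l : List Int) (P Q : Int → Bool) (himp : ∀ i, Q i = true → P i = true) :
    l.countP P = l.countP (fun i => P i && !Q i) + l.countP Q := by
  induction l with
  | nil => rfl
  | cons a l ih =>
    simp only [List.countP_cons, ih]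
    by_cases hq : Q a = true
    · simp [hq, himp a hq]; omega
    · simp only [Bool.not_eq_true] at hq
      by_cases hp : P a = true <;> simp [hp, hq] <;> omega

lemma pvDiff_getD (k : Int) (n : Nat) (hk : 0 ≤ k) : ∀ (hits : List Int) (d : List Int),
    d.length = n + 1 → (∀ i ∈ hits, 0 ≤ i ∧ i + k ≤ (n : Int)) → ∀ (q : Nat),
    (hits.foldl (fun d i =>
        let d1 := d.set i.toNat (d.getD i.toNat 0 + 1)
        d1.set (i + k).toNat (d1.getD (i + k).toNat 0 - 1)) d).getD q 0
      = d.getD q 0 + (hits.countP (fun i => decide ((q : Int) = i)) : Int)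
          - (hits.countP (fun i => decide ((q : Int) = i + k)) : Int) := by
  intro hits
  induction hits with
  | nil => intro d _ _ q; simp
  | cons i hits ih =>
    intro d hd hb q
    have hbi := hb i List.mem_cons_self
    have l1 : i.toNat < d.length := by omega
    have l1' : i.toNat < (d.set i.toNat (d.getD i.toNat 0 + 1)).length := by simpa using l1
    have l2 : (i + k).toNat < (d.set i.toNat (d.getD i.toNat 0 + 1)).length := by simp; omega
    simp only [List.foldl_cons]
    rw [ih _ (by simpa using hd) (fun j hj => hb j (List.mem_cons_of_mem _ hj)) q]
    rw [pvSetGetD _ _ _ _ l2, pvSetGetD _ _ _ _ l1, pvSetGetD _ _ _ _ l1]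
    have c1 : ((q : Int) = i) ↔ q = i.toNat := by omega
    have c2 : ((q : Int) = i + k) ↔ q = (i + k).toNat := by omega
    simp only [List.countP_cons, decide_eq_true_eq, c1, c2]
    by_cases hik : (i + k).toNat = i.toNat <;> by_cases h1 : q = i.toNat <;>
      by_cases h2 : q = (i + k).toNat <;> simp [h1, h2, hik] <;> push_cast <;> omega

lemma pvCovN_succ (hits : List Int) (k : Int) (p : Nat) :
    pvCovN hits k p + ((hits.countP (fun i => decide ((p : Int) = i)) : Int)
        - (hits.countP (fun i => decide ((p : Int) = i + k)) : Int)) = pvCovN hits k (p + 1) := by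
  simp only [pvCovN, Nat.cast_add, Nat.cast_one]
  rw [pvCountP_lt_succ hits (fun i => i) (p : Int), pvCountP_lt_succ hits (fun i => i + k) (p : Int)]
  push_cast
  ring

lemma pvCovN_zero (hits : List Int) (k : Int) (hk : 0 ≤ k) (h : ∀ i ∈ hits, 0 ≤ i) :
    pvCovN hits k 0 = 0 := by
  have h1 : hits.countP (fun i => decide (i < (0 : Int))) = 0 := by
    rw [List.countP_eq_zero]; intro a ha; simpa using by have := h a ha; omega
  have h2 : hits.countP (fun i => decide (i + k < (0 : Int))) = 0 := by
    rw [List.countP_eq_zero]; intro a ha; simpa using by have := h a ha; omega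
  simp [pvCovN, h1, h2]

lemma pvCovN_pos_iff (hits : List Int) (k : Int) (hk : 0 ≤ k) (p : Nat) :
    (0 < pvCovN hits k (p + 1)) ↔ pvCover hits k p = true := by
  have e1 : hits.countP (fun i => decide (i < (((p + 1 : Nat)) : Int)))
      = hits.countP (fun i => decide (i ≤ (p : Int))) := by
    apply List.countP_congr
    intro a _
    simp only [decide_eq_true_eq]
    push_cast
    omega
  have e2 : hits.countP (fun i => decide (i + k < (((p + 1 : Nat)) : Int)))
      = hits.countP (fun i => decide (i + k ≤ (p : Int))) := by
    apply List.countP_congr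
    intro a _
    simp only [decide_eq_true_eq]
    push_cast
    omega
  have e3 := pvCountP_sub hits (fun i => decide (i ≤ (p : Int))) (fun i => decide (i + k ≤ (p : Int)))
    (fun i h => by simp at *; omega)
  have e4 : hits.countP (fun i => decide (i ≤ (p : Int)) && !decide (i + k ≤ (p : Int)))
      = hits.countP (fun i => decide (i ≤ (p : Int) ∧ (p : Int) < i + k)) := by
    apply List.countP_congr
    intro a _
    by_cases h1 : a ≤ (p : Int) <;> by_cases h2 : a + k ≤ (p : Int) <;> simp [h1, h2] <;> omega
  simp only [pvCovN, e1, e2, e3, e4]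
  rw [pvCover, List.any_eq_true]
  constructor
  · intro h
    have : 0 < hits.countP (fun i => decide (i ≤ (p : Int) ∧ (p : Int) < i + k)) := by omega
    obtain ⟨a, ha, hpa⟩ := List.countP_pos_iff.mp this
    exact ⟨a, ha, hpa⟩
  · intro ⟨a, ha, hpa⟩
    have : 0 < hits.countP (fun i => decide (i ≤ (p : Int) ∧ (p : Int) < i + k)) :=
      List.countP_pos_iff.mpr ⟨a, ha, hpa⟩
    omega

lemma pvSweep (hits : List Int) (k : Int) (diffL : List Int)
    (hdiff : ∀ q : Nat, diffL.getD q 0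
      = (hits.countP (fun i => decide ((q : Int) = i)) : Int)
          - (hits.countP (fun i => decide ((q : Int) = i + k)) : Int)) :
    ∀ (t : List Char) (start : Nat) (acc : List Char),
    ((PySem.List.enumerate t (start : Int)).foldl (fun st pc =>
        let cov := st.1 + PySem.List.pyGetD diffL pc.1 0
        (cov, st.2 ++ [if 0 < cov then PySem.Chars.lowerChar pc.2 else pc.2]))
      (pvCovN hits k start, acc)).2 = acc ++ pvOut hits k t start := by
  intro t
  induction t with
  | nil => intro start acc; simp [pvOut, PySem.List.enumerate]
  | cons c t ih =>
    intro start acc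
    rw [PySem.List.enumerate_cons]
    simp only [List.foldl_cons, PySem.List.pyGetD_natCast]
    have hcov : pvCovN hits k start + (List.getD diffL start 0) = pvCovN hits k (start + 1) := by
      rw [hdiff start]
      exact pvCovN_succ hits k start
    have hcast : ((start : Int) + 1) = (((start + 1 : Nat)) : Int) := by push_cast; ring
    rw [hcast]
    have := ih (start + 1) (acc ++ [if 0 < pvCovN hits k (start + 1) then PySem.Chars.lowerChar c else c])
    simp only [hcov] at *
    rw [this]
    simp [pvOut]

lemma pvOut_len (hits : List Int) (k : Int) : ∀ (t : List Char) (p : Nat), (pvOut hits k t p).length = t.length := by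
  intro t
  induction t with
  | nil => intro p; rfl
  | cons c t ih => intro p; simp [pvOut, ih]

lemma pvOut_getElem (hits : List Int) (k : Int) : ∀ (t : List Char) (p : Nat) (j : Nat) (hj : j < t.length),
    (pvOut hits k t p)[j]'(by rw [pvOut_len]; exact hj)
      = if 0 < pvCovN hits k (p + j + 1) then PySem.Chars.lowerChar t[j] else t[j] := by
  intro t
  induction t with
  | nil => intro p j hj; simp at hj
  | cons c t ih =>
    intro p j hj
    cases j with
    | zero => simp [pvOut]
    | succ j =>
      simp only [pvOut, List.getElem_cons_succ]
      rw [ih (p + 1) j (by simpa using hj)]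
      ring_nf

lemma pvMaskSeq_eq (R : PySem.Set (List Char)) (k : Int) (hk : 0 ≤ k) (seq : String) :
    pvMaskSeqA R k seq = pvMaskSeqB R k seq := by
  simp only [pvMaskSeqA, pvMaskSeqB]
  set s := PySem.Chars.upper seq.toList with hs
  apply congrArg String.ofList
  have hfilA : (PySem.List.pyRange 0 ((s.length : Int) - k + 1) 1).foldl
      (fun m i => if PySem.Set.contains R (PySem.List.slice s (some i) (some (i + k))) then
          (PySem.List.pyRange i (i + k) 1).foldl (fun m2 j => m2.set j.toNat true) m
        else m) (List.replicate s.length false)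
      = (pvHits R k s).foldl
          (fun m i => (PySem.List.pyRange i (i + k) 1).foldl (fun m2 j => m2.set j.toNat true) m)
          (List.replicate s.length false) :=
    PySem.List.foldl_if_eq_foldl_filter _ _ _ _
  have hfilB : (PySem.List.pyRange 0 ((s.length : Int) - k + 1) 1).foldl
      (fun d i => if PySem.Set.contains R (PySem.List.slice s (some i) (some (i + k))) then
          (d.set i.toNat (d.getD i.toNat 0 + 1)).set (i + k).toNat
            ((d.set i.toNat (d.getD i.toNat 0 + 1)).getD (i + k).toNat 0 - 1)
        else d) (List.replicate (s.length + 1) (0 : Int))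
      = (pvHits R k s).foldl
          (fun d i => (d.set i.toNat (d.getD i.toNat 0 + 1)).set (i + k).toNat
            ((d.set i.toNat (d.getD i.toNat 0 + 1)).getD (i + k).toNat 0 - 1))
          (List.replicate (s.length + 1) (0 : Int)) :=
    PySem.List.foldl_if_eq_foldl_filter _ _ _ _
  rw [hfilA, hfilB]
  have hhits : ∀ i ∈ pvHits R k s, 0 ≤ i ∧ i + k ≤ (s.length : Int) := by
    intro i hi
    rw [pvHits, List.mem_filter] at hi
    have := PySem.List.mem_pyRange_one.mp hi.1
    omega
  -- A side: mask fold
  have hmlen : ((pvHits R k s).foldl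
      (fun m i => (PySem.List.pyRange i (i + k) 1).foldl (fun m2 j => m2.set j.toNat true) m)
      (List.replicate s.length false)).length = s.length := by
    rw [pvFoldlLen _ _ _ (fun acc i => pvMark_len acc i (i + k))]
    simp
  have hA := pvLowerFold ((pvHits R k s).foldl
      (fun m i => (PySem.List.pyRange i (i + k) 1).foldl (fun m2 j => m2.set j.toNat true) m)
      (List.replicate s.length false)) [] s hmlen.symm
  simp only [List.length_nil, Nat.cast_zero, List.nil_append] at hA
  rw [hA]
  -- B side: diff fold + sweep
  have hdlen : ∀ q : Nat, ((pvHits R k s).foldl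
      (fun d i => (d.set i.toNat (d.getD i.toNat 0 + 1)).set (i + k).toNat
          ((d.set i.toNat (d.getD i.toNat 0 + 1)).getD (i + k).toNat 0 - 1))
      (List.replicate (s.length + 1) (0 : Int))).getD q 0
      = ((pvHits R k s).countP (fun i => decide ((q : Int) = i)) : Int)
          - ((pvHits R k s).countP (fun i => decide ((q : Int) = i + k)) : Int) := by
    intro q
    rw [pvDiff_getD k s.length hk (pvHits R k s) _ (by simp) hhits q]
    simp
  have hB := pvSweep (pvHits R k s) k _ hdlen s 0 []
  rw [pvCovN_zero (pvHits R k s) k hk (fun i hi => (hhits i hi).1)] at hB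
  simp only [Nat.cast_zero, List.nil_append] at hB
  rw [hB]
  -- pointwise equality of the two outputs
  apply List.ext_getElem
  · simp [List.length_zipWith, hmlen, pvOut_len]
  · intro j h1 h2
    have hj : j < s.length := by simpa [pvOut_len] using h2
    rw [List.getElem_zipWith, pvOut_getElem (pvHits R k s) k s 0 j hj]
    have hmj : j < ((pvHits R k s).foldl
        (fun m i => (PySem.List.pyRange i (i + k) 1).foldl (fun m2 j => m2.set j.toNat true) m)
        (List.replicate s.length false)).length := by omega
    have hmask : ((pvHits R k s).foldl
        (fun m i => (PySem.List.pyRange i (i + k) 1).foldl (fun m2 j => m2.set j.toNat true) m)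
        (List.replicate s.length false))[j] = pvCover (pvHits R k s) k j := by
      rw [← List.getD_eq_getElem _ false hmj]
      rw [pvMaskA_getD k j (pvHits R k s) (List.replicate s.length false) (by simpa using hhits)]
      simp
    rw [hmask]
    simp only [Nat.zero_add]
    have hpos := pvCovN_pos_iff (pvHits R k s) k hk j
    by_cases hc : pvCover (pvHits R k s) k j = true
    · simp [hc, hpos.mpr hc]
    · have hnot : ¬ (0 < pvCovN (pvHits R k s) k (j + 1)) := fun hlt => hc (hpos.mp hlt)
      simp [hc, hnot]

lemma pvRepeats_eq (seqs : List (String × String)) (k threshold : Int) :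
    pvRepeatsA (pvCountsA seqs k) threshold = pvRepeatsB seqs k threshold := by
  rw [pvRepeatsA, pvRepeatsB, pvCounts_eq]

-- ===== VERDICT (by name: the statement is the Claim_ definition above) =====
theorem self_repeat_softmask_spec : Claim_equal_self_repeat_softmask := by
  intro seqs k threshold _ hpre
  show self_repeat_softmask seqs k threshold = self_repeat_softmask_alt seqs k threshold
  simp only [self_repeat_softmask, self_repeat_softmask_alt]
  refine congrArg PySem.Dict.items (PySem.List.foldl_congr_mem seqs _ _ _ ?_)
  intro acc pr _
  rw [pvRepeats_eq, pvMaskSeq_eq _ _ hpre]
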